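-- pv_equiv track=rewrite | github.com/srlang/Cribbage | Python/scorer.py | each_type
-- ===== SOURCE A (Python) =====
-- from math import floor
--
-- def valid_hand(hand):
--     s = len(hand)
--     b = True
--     for card in hand:
--         if card < 0 or card > 51:
--             b = False
--             break
--     return (s == 5) and b
--
-- def value(card):
--     return floor(card / 4)
--
-- def number_equal(arr, elem):
--     count = 0
--     for i in arr:
--         count += 1 if i == elem else 0
--     return count
--
-- def each_type(hand):
--     assert valid_hand(hand)
--     h = hand[:]
--     for i in range(len(hand)):
--         h[i] = value(hand[i])
--     adj = 13 * [0]
--     for i in range(13):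
--         adj[i] = number_equal(h, i)
--     return adj
-- ===== SOURCE B (Python) =====
-- def valid_hand(hand):
--     s = len(hand)
--     b = True
--     for card in hand:
--         if card < 0 or card > 51:
--             b = False
--             break
--     return (s == 5) and b
--
-- def each_type(hand):
--     assert valid_hand(hand)
--     adj = 13 * [0]
--     for card in hand:
--         adj[card // 4] += 1
--     return adj
-- ===== Notes on version B (the rewrite author's own statement) =====
-- stated objective: simpler
-- what changed: B builds the 13-bucket histogram in one pass (adj[card//4] += 1 per card) instead of A's two stages (map every card to its rank value, then scan the mapped list once per each of the 13 ranks).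
import Mathlib
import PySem

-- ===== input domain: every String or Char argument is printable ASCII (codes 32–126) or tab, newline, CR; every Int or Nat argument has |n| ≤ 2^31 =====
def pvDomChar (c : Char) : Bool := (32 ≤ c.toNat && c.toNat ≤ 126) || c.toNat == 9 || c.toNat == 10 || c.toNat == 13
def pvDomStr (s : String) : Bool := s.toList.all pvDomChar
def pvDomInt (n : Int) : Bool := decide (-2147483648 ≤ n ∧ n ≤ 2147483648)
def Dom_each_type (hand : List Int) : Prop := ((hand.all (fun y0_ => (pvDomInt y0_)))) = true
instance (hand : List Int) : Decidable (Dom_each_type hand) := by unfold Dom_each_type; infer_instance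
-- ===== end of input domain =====

-- B replaces A's map-then-13-scans counting with a single histogram pass; return value only, no mutation.

-- ===== PORT A =====
-- the for-loop with break computes 'all cards in 0..51'
def valid_hand (hand : List Int) : Bool :=
  decide (hand.length = 5) && hand.all (fun card => decide (0 ≤ card) && decide (card ≤ 51))

-- Python value(card) = floor(card/4); exact as floor division for |card| ≤ 2^31 (the float quotient of such ints floors identically)
def value (card : Int) : Int := PySem.Int.floordiv card 4

def number_equal (arr : List Int) (elem : Int) : Int :=
  arr.foldl (fun count i => count + if i = elem then 1 else 0) 0

def each_type (hand : List Int) : List Int :=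
  if valid_hand hand then
    let h := hand.map (fun c => value c)
    (List.range 13).foldl (fun adj i => adj.set i (number_equal h (Int.ofNat i)))
      (List.replicate 13 (0 : Int))
  else []  -- assert fails: Python raises AssertionError; excluded by Pre_

-- ===== PORT B =====
def each_type_alt (hand : List Int) : List Int :=
  if valid_hand hand then
    hand.foldl (fun adj card =>
        adj.set (PySem.Int.floordiv card 4).toNat
          (adj.getD (PySem.Int.floordiv card 4).toNat 0 + 1))
      (List.replicate 13 (0 : Int))
  else []  -- assert fails: Python raises AssertionError; excluded by Pre_

-- ===== PRECONDITION & SPEC =====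
-- exactly the inputs on which A's (and B's) assert passes; elsewhere Python raises AssertionError
def Pre_each_type (hand : List Int) : Prop :=
  hand.length = 5 ∧ ∀ c ∈ hand, 0 ≤ c ∧ c ≤ 51
instance (hand : List Int) : Decidable (Pre_each_type hand) := by unfold Pre_each_type; infer_instance
def pvWitness_each_type : List Int := [0, 1, 7, 50, 51]

def Spec_each_type (hand : List Int) (out : List Int) : Prop := out = each_type_alt hand
instance (hand : List Int) (out : List Int) : Decidable (Spec_each_type hand out) := by unfold Spec_each_type; infer_instance

-- ===== CLAIM (what is proved, stated in full; the proofs are below) =====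
def Claim_equal_each_type : Prop := ∀ (hand : List Int), Dom_each_type hand → Pre_each_type hand → Spec_each_type hand (each_type hand)

-- ===== LEMMAS AND PROOFS =====

theorem getD_set' (l : List Int) (k : Nat) (x : Int) (j : Nat) :
    (l.set k x).getD j 0 = if k = j ∧ k < l.length then x else l.getD j 0 := by
  by_cases hk : k = j
  · subst hk
    by_cases hl : k < l.length
    · simp [List.getD_eq_getElem?_getD, hl]
    · have h2 : l.length ≤ k := le_of_not_gt hl
      simp [List.getD_eq_getElem?_getD, hl]
  · simp [List.getD_eq_getElem?_getD, hk]

-- number_equal counts occurrences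
theorem number_equal_count (arr : List Int) (elem : Int) :
    number_equal arr elem = (arr.count elem : Int) := by
  unfold number_equal
  suffices h : ∀ (acc : Int), arr.foldl (fun count i => count + if i = elem then 1 else 0) acc
      = acc + (arr.count elem : Int) by simpa using h 0
  induction arr with
  | nil => intro acc; simp
  | cons c t ih =>
    intro acc
    by_cases hc : c = elem
    · subst hc
      simp only [List.foldl_cons, ih, List.count_cons_self]
      push_cast
      ring
    · simp only [List.foldl_cons, if_neg hc, add_zero, ih,
        List.count_cons_of_ne hc]

-- A's write-each-index loop: length and pointwise value
theorem rangefold_spec (g : Nat → Int) (n : Nat) (acc : List Int) :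
    (((List.range n).foldl (fun a i => a.set i (g i)) acc).length = acc.length) ∧
    (∀ j, ((List.range n).foldl (fun a i => a.set i (g i)) acc).getD j 0
        = if j < n ∧ j < acc.length then g j else acc.getD j 0) := by
  induction n with
  | zero => simp
  | succ n ih =>
    rw [List.range_succ, List.foldl_append]
    obtain ⟨hlen, hget⟩ := ih
    simp only [List.foldl_cons, List.foldl_nil]
    refine ⟨by simp [hlen], ?_⟩
    intro j
    rw [getD_set', hlen, hget j]
    by_cases hnj : n = j
    · subst hnj
      by_cases hn : n < acc.length <;> simp [hn]
    · by_cases h1 : j < n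
      · simp [hnj, h1, Nat.lt_succ_of_lt h1]
      · have h2 : ¬ j < n + 1 := by omega
        simp [hnj, h1, h2]

-- B's histogram loop: length and pointwise value
theorem histfold_spec (l : List Int) :
    ∀ (acc : List Int), (∀ c ∈ l, (PySem.Int.floordiv c 4).toNat < acc.length) →
    ((l.foldl (fun adj card => adj.set (PySem.Int.floordiv card 4).toNat
        (adj.getD (PySem.Int.floordiv card 4).toNat 0 + 1)) acc).length = acc.length) ∧
    (∀ j, (l.foldl (fun adj card => adj.set (PySem.Int.floordiv card 4).toNat
        (adj.getD (PySem.Int.floordiv card 4).toNat 0 + 1)) acc).getD j 0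
      = acc.getD j 0 + ((l.map (fun c => (PySem.Int.floordiv c 4).toNat)).count j : Int)) := by
  induction l with
  | nil => intro acc _; simp
  | cons c t ih =>
    intro acc hmem
    have hc : (PySem.Int.floordiv c 4).toNat < acc.length := hmem c (by simp)
    have hlen' : (acc.set (PySem.Int.floordiv c 4).toNat
        (acc.getD (PySem.Int.floordiv c 4).toNat 0 + 1)).length = acc.length := by simp
    obtain ⟨ihlen, ihget⟩ := ih (acc.set (PySem.Int.floordiv c 4).toNat
        (acc.getD (PySem.Int.floordiv c 4).toNat 0 + 1))
      (fun x hx => by rw [hlen']; exact hmem x (by simp [hx]))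
    simp only [List.foldl_cons]
    refine ⟨by rw [ihlen, hlen'], ?_⟩
    intro j
    rw [ihget j, getD_set', List.map_cons]
    by_cases hvj : (PySem.Int.floordiv c 4).toNat = j
    · rw [if_pos ⟨hvj, hc⟩, hvj, List.count_cons_self]
      push_cast
      ring
    · rw [if_neg (fun hh => hvj hh.1), List.count_cons_of_ne hvj]

-- counting the Int rank in the mapped list = counting its toNat image, values being nonneg
theorem count_map_toNat (l : List Int) (j : Nat)
    (hnn : ∀ c ∈ l, 0 ≤ PySem.Int.floordiv c 4) :
    (l.map (fun c => PySem.Int.floordiv c 4)).count (Int.ofNat j)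
      = (l.map (fun c => (PySem.Int.floordiv c 4).toNat)).count j := by
  induction l with
  | nil => simp
  | cons c t ih =>
    have hc : 0 ≤ PySem.Int.floordiv c 4 := hnn c (by simp)
    have ih' := ih (fun x hx => hnn x (by simp [hx]))
    have heq : (PySem.Int.floordiv c 4 = Int.ofNat j) ↔ ((PySem.Int.floordiv c 4).toNat = j) := by
      constructor
      · intro h; rw [h]; simp
      · intro h; rw [← h]; exact (Int.toNat_of_nonneg hc).symm
    rw [List.map_cons, List.map_cons]
    by_cases h : PySem.Int.floordiv c 4 = Int.ofNat j
    · rw [heq.mp h, h, List.count_cons_self, List.count_cons_self, ih']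
    · rw [List.count_cons_of_ne h,
        List.count_cons_of_ne (fun hq => h (heq.mpr hq)), ih']

theorem floordiv_bounds (c : Int) (h0 : 0 ≤ c) (h1 : c ≤ 51) :
    0 ≤ PySem.Int.floordiv c 4 ∧ PySem.Int.floordiv c 4 < 13 := by
  rw [PySem.Int.floordiv_eq_ediv_of_pos (by omega : (0:Int) < 4)]
  omega

-- ===== VERDICT (by name: the statement is the Claim_ definition above) =====
theorem each_type_spec : Claim_equal_each_type := by
  intro hand _ hpre
  obtain ⟨hlen, hrange⟩ := hpre
  have hvalid : valid_hand hand = true := by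
    unfold valid_hand
    simp only [Bool.and_eq_true, decide_eq_true_eq, List.all_eq_true]
    exact ⟨hlen, fun c hc => by
      obtain ⟨h0, h1⟩ := hrange c hc
      simp [h0, h1]⟩
  unfold Spec_each_type each_type each_type_alt
  rw [if_pos hvalid, if_pos hvalid]
  show (List.range 13).foldl
      (fun adj i => adj.set i (number_equal (hand.map (fun c => value c)) (Int.ofNat i)))
      (List.replicate 13 (0 : Int))
    = hand.foldl (fun adj card => adj.set (PySem.Int.floordiv card 4).toNat
        (adj.getD (PySem.Int.floordiv card 4).toNat 0 + 1)) (List.replicate 13 (0 : Int))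
  have hbounds : ∀ c ∈ hand, 0 ≤ PySem.Int.floordiv c 4 ∧ PySem.Int.floordiv c 4 < 13 := by
    intro c hc; obtain ⟨h0, h1⟩ := hrange c hc; exact floordiv_bounds c h0 h1
  have hmem : ∀ c ∈ hand, (PySem.Int.floordiv c 4).toNat < (List.replicate 13 (0:Int)).length := by
    intro c hc; obtain ⟨h0, h1⟩ := hbounds c hc
    simp only [List.length_replicate]; omega
  obtain ⟨blen, bget⟩ := histfold_spec hand (List.replicate 13 (0:Int)) hmem
  obtain ⟨alen, aget⟩ := rangefold_spec
    (fun i => number_equal (hand.map (fun c => value c)) (Int.ofNat i)) 13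
    (List.replicate 13 (0:Int))
  apply List.ext_getElem
  · rw [alen, blen]
  · intro j hja hjb
    have hj13 : j < 13 := by rw [alen] at hja; simpa using hja
    rw [← List.getD_eq_getElem _ 0, ← List.getD_eq_getElem _ 0, aget j, bget j]
    rw [if_pos ⟨hj13, by simpa using hj13⟩]
    rw [List.getD_replicate]
    simp only [value]
    rw [number_equal_count, count_map_toNat hand j (fun c hc => (hbounds c hc).1)]
    ring
    exact hj13
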